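-- pv_equiv track=rewrite | github.com/bigdatacon/voley_bet_3_set | voley_set/func_0_pred_obr_aft_pars.py | get_info_about_incorr_propusk
-- ===== SOURCE A (Python) =====
-- def get_info_about_incorr_propusk(i): # на вход движение счета по одному из сетов
--     l = []
--     count = 0
--     for g in range(len(i)-1):
--         if i[g+1]== i[g]:
--             count+=1
--         else:
--             if count!=0:
--                 # prfloat(f' eto count : {count}')
--                 l.append(count)
--                 count = 0
--     flag = True if len(i)<25 else False
--     return any([x > 0 for x in l]) or flag
-- ===== SOURCE B (Python) =====
-- def get_info_about_incorr_propusk(i):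
--     # Run-length decomposition: True iff some maximal run of equal adjacent
--     # scores other than the last has length >= 2, or the set has < 25 rallies.
--     n = len(i)
--     runs = []
--     j = 0
--     while j < n:
--         k = j + 1
--         while k < n and i[k] == i[j]:
--             k += 1
--         runs.append(k - j)
--         j = k
--     return any(x >= 2 for x in runs[:-1]) or n < 25
-- ===== Notes on version B (the rewrite author's own statement) =====
-- stated objective: simpler
-- what changed: Replaces A's index loop with a reset counter plus a collected list of counts and a final any([x>0]) by a run-length decomposition: recursively compute the lengths of maximal runs of equal adjacent scores and return True iff some run other than the last has length >= 2, or len(i) < 25.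
import Mathlib
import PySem

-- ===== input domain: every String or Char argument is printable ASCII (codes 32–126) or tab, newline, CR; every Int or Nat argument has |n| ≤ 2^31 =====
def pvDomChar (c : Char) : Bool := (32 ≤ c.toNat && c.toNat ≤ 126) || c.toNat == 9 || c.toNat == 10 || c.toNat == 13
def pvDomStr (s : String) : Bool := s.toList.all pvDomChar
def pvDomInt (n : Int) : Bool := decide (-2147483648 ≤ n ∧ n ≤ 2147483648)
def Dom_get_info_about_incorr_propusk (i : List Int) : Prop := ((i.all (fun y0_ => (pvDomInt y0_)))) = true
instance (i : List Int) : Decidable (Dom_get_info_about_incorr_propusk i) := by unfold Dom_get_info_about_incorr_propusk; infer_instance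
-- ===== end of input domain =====

-- B replaces A's reset-counter index loop by a run-length decomposition: some non-final
-- maximal run has length >= 2, or len(i) < 25 (objective: simpler/alternative, same cost).


-- ===== PORT A =====
-- for g in range(len(i)-1): indices g, g+1 are always in range, so getD is exact here
def get_info_about_incorr_propusk (i : List Int) : Bool :=
  let st := (List.range (i.length - 1)).foldl
    (fun (st : List Int × Int) g =>
      if i.getD (g + 1) 0 == i.getD g 0 then (st.1, st.2 + 1)
      else if st.2 ≠ 0 then (st.1 ++ [st.2], 0) else st)
    ([], 0)
  let flag := decide (i.length < 25)
  (st.1.any (fun x => decide (0 < x))) || flag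

-- ===== PORT B =====
-- inner while loop: advance k while k < len(i) and i[k] == v (v is i[j])
def pvScan (i : List Int) (v : Int) (k : Nat) : Nat :=
  if k < i.length ∧ i.getD k 0 == v then pvScan i v (k + 1) else k
termination_by i.length - k
decreasing_by omega

-- k <= pvScan i v k (cited by pvRunsLoop's termination proof)
lemma pvScan_ge (i : List Int) (v : Int) (k : Nat) : k ≤ pvScan i v k := by
  rw [pvScan]
  split
  · have := pvScan_ge i v (k + 1); omega
  · exact Nat.le.refl
termination_by i.length - k
decreasing_by omega

-- outer while loop: collect the maximal-run lengths k - j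
def pvRunsLoop (i : List Int) (j : Nat) (runs : List Nat) : List Nat :=
  if j < i.length then
    pvRunsLoop i (pvScan i (i.getD j 0) (j + 1)) (runs ++ [pvScan i (i.getD j 0) (j + 1) - j])
  else runs
termination_by i.length - j
decreasing_by have := pvScan_ge i (i.getD j 0) (j + 1); omega

def get_info_about_incorr_propusk_alt (i : List Int) : Bool :=
  let runs := pvRunsLoop i 0 []
  (runs.dropLast.any (fun x => decide (2 ≤ x))) || decide (i.length < 25)

-- ===== PRECONDITION & SPEC =====
def Spec_get_info_about_incorr_propusk (i : List Int) (out : Bool) : Prop := out = get_info_about_incorr_propusk_alt i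
instance (i : List Int) (out : Bool) : Decidable (Spec_get_info_about_incorr_propusk i out) := by unfold Spec_get_info_about_incorr_propusk; infer_instance

-- ===== CLAIM (what is proved, stated in full; the proofs are below) =====
def Claim_equal_get_info_about_incorr_propusk : Prop := ∀ (i : List Int), Dom_get_info_about_incorr_propusk i → Spec_get_info_about_incorr_propusk i (get_info_about_incorr_propusk i)

-- ===== LEMMAS AND PROOFS =====

-- runs of i as a recursive decomposition (proof-side characterisation of pvRunsLoop)
def pvRunsB : List Int → List Nat
  | [] => []
  | x :: xs =>
      let t := xs.takeWhile (fun y => y == x)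
      (t.length + 1) :: pvRunsB (xs.drop t.length)
termination_by xs => xs.length
decreasing_by simp


lemma pvScan_eq (i : List Int) (v : Int) (k : Nat) :
    pvScan i v k = k + ((i.drop k).takeWhile (fun y => y == v)).length := by
  rw [pvScan]
  by_cases h : k < i.length ∧ i.getD k 0 == v
  · rw [if_pos h]
    obtain ⟨hk, hv⟩ := h
    have hdrop : i.drop k = i.getD k 0 :: i.drop (k + 1) := by
      rw [List.getD_eq_getElem _ _ hk]
      exact List.drop_eq_getElem_cons hk
    rw [pvScan_eq i v (k + 1), hdrop, List.takeWhile_cons, if_pos hv]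
    simp; omega
  · rw [if_neg h]
    rcases Nat.lt_or_ge k i.length with hk | hk
    · have hv : ¬ (i.getD k 0 == v) := fun hv => h ⟨hk, hv⟩
      have hdrop : i.drop k = i.getD k 0 :: i.drop (k + 1) := by
        rw [List.getD_eq_getElem _ _ hk]
        exact List.drop_eq_getElem_cons hk
      rw [hdrop, List.takeWhile_cons, if_neg (by simpa using hv)]
      simp
    · rw [List.drop_eq_nil_of_le hk]
      simp
termination_by i.length - k
decreasing_by omega

lemma pvRunsLoop_eq (i : List Int) (j : Nat) (acc : List Nat) :
    pvRunsLoop i j acc = acc ++ pvRunsB (i.drop j) := by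
  rw [pvRunsLoop]
  by_cases h : j < i.length
  · rw [if_pos h]
    have hdrop : i.drop j = i.getD j 0 :: i.drop (j + 1) := by
      rw [List.getD_eq_getElem _ _ h]
      exact List.drop_eq_getElem_cons h
    have hscan := pvScan_eq i (i.getD j 0) (j + 1)
    have hge := pvScan_ge i (i.getD j 0) (j + 1)
    rw [pvRunsLoop_eq i (pvScan i (i.getD j 0) (j + 1)) _]
    rw [hdrop, pvRunsB]
    have hdd : i.drop (pvScan i (i.getD j 0) (j + 1))
        = (i.drop (j + 1)).drop ((i.drop (j + 1)).takeWhile (fun y => y == i.getD j 0)).length := by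
      rw [hscan, List.drop_drop]
    rw [hdd]
    have hlen : pvScan i (i.getD j 0) (j + 1) - j
        = ((i.drop (j + 1)).takeWhile (fun y => y == i.getD j 0)).length + 1 := by
      rw [hscan]; omega
    rw [hlen]
    simp
  · rw [if_neg h]
    rw [List.drop_eq_nil_of_le (by omega), pvRunsB]
    simp
termination_by i.length - j
decreasing_by omega


-- the adjacent-pairs list of i, = i.zip i.tail
def pvPairs : List Int → List (Int × Int)
  | [] => []
  | [_] => []
  | a :: b :: rest => (a, b) :: pvPairs (b :: rest)

-- A's loop body as a function of the pair of adjacent values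
def pvStepA (st : List Int × Int) (p : Int × Int) : List Int × Int :=
  if p.2 == p.1 then (st.1, st.2 + 1)
  else if st.2 ≠ 0 then (st.1 ++ [st.2], 0) else st

lemma pvPairs_eq_map : ∀ (i : List Int),
    pvPairs i = (List.range (i.length - 1)).map (fun g => (i.getD g 0, i.getD (g + 1) 0)) := by
  intro i
  match i with
  | [] => simp [pvPairs]
  | [a] => simp [pvPairs]
  | a :: b :: rest =>
    have ih := pvPairs_eq_map (b :: rest)
    simp only [pvPairs, ih, List.length_cons, Nat.add_sub_cancel]
    rw [List.range_succ_eq_map]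
    simp [List.map_map, Function.comp]

lemma foldA_pairs (i : List Int) (s : List Int × Int) :
    (List.range (i.length - 1)).foldl
      (fun (st : List Int × Int) g =>
        if i.getD (g + 1) 0 == i.getD g 0 then (st.1, st.2 + 1)
        else if st.2 ≠ 0 then (st.1 ++ [st.2], 0) else st) s
    = (pvPairs i).foldl pvStepA s := by
  rw [pvPairs_eq_map, List.foldl_map]
  rfl

lemma pvPairs_run : ∀ (t : List Int) (r : List Int) (x : Int), (∀ y ∈ t, y = x) →
    pvPairs (x :: (t ++ r))
      = List.replicate t.length (x, x) ++
        (match r with | [] => [] | y :: _ => (x, y) :: pvPairs r) := by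
  intro t
  induction t with
  | nil =>
    intro r x _
    match r with
    | [] => simp [pvPairs]
    | y :: r' => simp [pvPairs]
  | cons z t' ih =>
    intro r x h
    have hz : z = x := h z (by simp)
    subst hz
    have := ih r z (fun y hy => h y (by simp [hy]))
    simpa [pvPairs, List.replicate_succ] using this

lemma foldA_replicate (k : Nat) (x : Int) (l : List Int) (c : Int) :
    (List.replicate k (x, x)).foldl pvStepA (l, c) = (l, c + k) := by
  induction k generalizing c with
  | zero => simp
  | succ n ih =>
    simp only [List.replicate_succ, List.foldl_cons, pvStepA, BEq.rfl, if_pos]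
    rw [ih]
    simp; ring

lemma mem_takeWhile_eq {x : Int} {xs : List Int} :
    ∀ y ∈ xs.takeWhile (fun y => y == x), y = x := by
  intro y hy
  have := List.mem_takeWhile_imp hy
  simpa using this

lemma drop_takeWhile (p : Int → Bool) (xs : List Int) :
    xs.drop (xs.takeWhile p).length = xs.dropWhile p := by
  nth_rewrite 2 [← List.takeWhile_append_dropWhile (p := p) (l := xs)]
  rw [List.drop_left]

lemma head_drop_ne {x : Int} {xs : List Int} {y : Int} {r' : List Int}
    (h : xs.drop (xs.takeWhile (fun y => y == x)).length = y :: r') : ¬ (y = x) := by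
  rw [drop_takeWhile] at h
  have := List.head?_dropWhile_not (p := fun y => y == x) (l := xs)
  rw [h] at this
  simpa using this

theorem main_loop (i : List Int) (l : List Int) :
    ((pvPairs i).foldl pvStepA (l, 0)).1.any (fun x => decide (0 < x))
      = (l.any (fun x => decide (0 < x))
          || (pvRunsB i).dropLast.any (fun k => decide (2 ≤ k))) := by
  match i with
  | [] => simp [pvPairs, pvRunsB]
  | x :: xs =>
    have hxs : xs = xs.takeWhile (fun y => y == x)
        ++ xs.drop (xs.takeWhile (fun y => y == x)).length := by
      rw [drop_takeWhile]
      exact (List.takeWhile_append_dropWhile (p := fun y => y == x) (l := xs)).symm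
    have hrun : pvRunsB (x :: xs)
        = ((xs.takeWhile (fun y => y == x)).length + 1)
            :: pvRunsB (xs.drop (xs.takeWhile (fun y => y == x)).length) := by
      rw [pvRunsB]
    have hpairs := pvPairs_run (xs.takeWhile (fun y => y == x))
      (xs.drop (xs.takeWhile (fun y => y == x)).length) x mem_takeWhile_eq
    conv_lhs => rw [hxs, hpairs]
    rw [List.foldl_append, foldA_replicate]
    match hr : xs.drop (xs.takeWhile (fun y => y == x)).length with
    | [] =>
      simp [hrun, hr, pvRunsB]
    | y :: r' =>
      have hyx : ¬ (y = x) := head_drop_ne hr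
      have hrne : pvRunsB (y :: r') ≠ [] := by rw [pvRunsB]; simp
      have hdrop : (((xs.takeWhile (fun y => y == x)).length + 1 : Nat)
            :: pvRunsB (y :: r')).dropLast
          = ((xs.takeWhile (fun y => y == x)).length + 1)
              :: (pvRunsB (y :: r')).dropLast := by
        match h2 : pvRunsB (y :: r') with
        | [] => exact absurd h2 hrne
        | a :: b => simp
      simp only [List.foldl_cons, pvStepA]
      rw [if_neg (by simpa using hyx)]
      rw [hrun, hr, hdrop]
      by_cases ht : (xs.takeWhile (fun y => y == x)).length = 0
      · rw [ht]
        simp only [Nat.cast_zero, zero_add]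
        rw [if_neg (by simp)]
        rw [main_loop (y :: r') l]
        simp
      · have hc : (0 : Int) + ((List.takeWhile (fun y => y == x) xs).length : Int) ≠ 0 := by
          simpa using ht
        rw [if_pos hc, main_loop (y :: r') _]
        simp [List.any_append, Bool.or_assoc, Nat.lt_iff_add_one_le]
termination_by i.length
decreasing_by all_goals (simp [← hr]; try omega)

-- ===== VERDICT (by name: the statement is the Claim_ definition above) =====
theorem get_info_about_incorr_propusk_spec : Claim_equal_get_info_about_incorr_propusk := by
  intro i _
  unfold Spec_get_info_about_incorr_propusk
  have halt : get_info_about_incorr_propusk_alt i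
      = (((pvRunsB i).dropLast.any (fun x => decide (2 ≤ x))) || decide (i.length < 25)) := by
    simp only [get_info_about_incorr_propusk_alt]
    rw [pvRunsLoop_eq]
    simp
  rw [halt]
  simp only [get_info_about_incorr_propusk, foldA_pairs, main_loop]
  simp
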